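-- pv_equiv track=rewrite | github.com/Garnik168/jobeasy-algorithms-course | Algorithms_1/Count_odd_and_even_numbers.py | count_odd_and_even_digits
-- ===== SOURCE A (Python) =====
-- def count_odd_and_even_digits(number):
--     even_count = 0
--     odd_count = 0
--     for num in str(abs(number)):
--         if int(num)% 2 == 0:
--             even_count += 1
--         else:
--             odd_count += 1
--     return f'In this number {even_count} is/are even and {odd_count} is/are odd'
-- ===== SOURCE B (Python) =====
-- def count_odd_and_even_digits(number):
--     n = abs(number)
--     if n == 0:
--         return 'In this number 1 is/are even and 0 is/are odd'
--     even_count = 0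
--     odd_count = 0
--     while n:
--         if n % 10 % 2 == 0:
--             even_count += 1
--         else:
--             odd_count += 1
--         n //= 10
--     return f'In this number {even_count} is/are even and {odd_count} is/are odd'
-- ===== Notes on version B (the rewrite author's own statement) =====
-- stated objective: alternative
-- what changed: B extracts digits arithmetically (repeated n % 10 / n //= 10 on abs(number), with 0 handled as one even digit) instead of converting to a string and parsing each character back with int().
import Mathlib
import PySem

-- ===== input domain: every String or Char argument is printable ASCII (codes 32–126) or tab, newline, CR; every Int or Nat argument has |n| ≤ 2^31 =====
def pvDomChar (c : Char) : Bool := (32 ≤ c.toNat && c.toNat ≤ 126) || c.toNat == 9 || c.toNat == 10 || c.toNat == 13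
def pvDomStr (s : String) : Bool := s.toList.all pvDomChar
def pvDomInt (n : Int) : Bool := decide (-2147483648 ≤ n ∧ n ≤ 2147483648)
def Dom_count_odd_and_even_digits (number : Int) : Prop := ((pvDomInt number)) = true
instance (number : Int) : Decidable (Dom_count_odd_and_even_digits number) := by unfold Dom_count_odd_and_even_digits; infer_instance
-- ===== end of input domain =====

-- B counts digits by arithmetic extraction (n % 10, n //= 10) instead of A's string conversion; alternative decomposition, same O(d) cost.


-- ===== PORT A =====
-- int(num) for the single digit character num; exact on '0'..'9', which is all
-- str(abs(number)) ever yields.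
def pvDigitVal (c : Char) : Int := (c.toNat : Int) - 48

-- step of A's for-loop over the characters of str(abs(number))
def pvAStep (p : Int × Int) (num : Char) : Int × Int :=
  if PySem.Int.mod (pvDigitVal num) 2 == 0 then (p.1 + 1, p.2) else (p.1, p.2 + 1)

def count_odd_and_even_digits (number : Int) : String :=
  let counts := (PySem.Int.toStr |number|).toList.foldl pvAStep (0, 0)
  "In this number " ++ PySem.Int.toStr counts.1 ++ " is/are even and " ++
    PySem.Int.toStr counts.2 ++ " is/are odd"

-- ===== PORT B =====
-- B's while-loop; n = abs(number) is nonnegative, so Nat division is exactly Python's //.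
def pvBLoop (n : Nat) (even_count odd_count : Int) : Int × Int :=
  if h : n = 0 then (even_count, odd_count)
  else if n % 10 % 2 = 0 then pvBLoop (n / 10) (even_count + 1) odd_count
  else pvBLoop (n / 10) even_count (odd_count + 1)
  decreasing_by all_goals exact Nat.div_lt_self (Nat.pos_of_ne_zero h) (by norm_num)

def count_odd_and_even_digits_alt (number : Int) : String :=
  let n := number.natAbs
  if n = 0 then "In this number 1 is/are even and 0 is/are odd"
  else
    let counts := pvBLoop n 0 0
    "In this number " ++ PySem.Int.toStr counts.1 ++ " is/are even and " ++
      PySem.Int.toStr counts.2 ++ " is/are odd"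

-- ===== PRECONDITION & SPEC =====
def Spec_count_odd_and_even_digits (number : Int) (out : String) : Prop := out = count_odd_and_even_digits_alt number
instance (number : Int) (out : String) : Decidable (Spec_count_odd_and_even_digits number out) := by unfold Spec_count_odd_and_even_digits; infer_instance

-- ===== CLAIM (what is proved, stated in full; the proofs are below) =====
def Claim_equal_count_odd_and_even_digits : Prop := ∀ (number : Int), Dom_count_odd_and_even_digits number → Spec_count_odd_and_even_digits number (count_odd_and_even_digits number)

-- ===== LEMMAS AND PROOFS =====

-- even/odd digit counts of a natural number, by the same recursion as B's loop
def pvE : Nat → Int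
  | 0 => 0
  | n + 1 => (if (n + 1) % 10 % 2 = 0 then 1 else 0) + pvE ((n + 1) / 10)
  decreasing_by exact Nat.div_lt_self (Nat.succ_pos n) (by norm_num)

def pvO : Nat → Int
  | 0 => 0
  | n + 1 => (if (n + 1) % 10 % 2 = 0 then 0 else 1) + pvO ((n + 1) / 10)
  decreasing_by exact Nat.div_lt_self (Nat.succ_pos n) (by norm_num)

theorem pvBLoop_eq (n : Nat) : ∀ ec oc, pvBLoop n ec oc = (ec + pvE n, oc + pvO n) := by
  induction n using Nat.strong_induction_on with
  | _ n ih =>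
    intro ec oc
    match n with
    | 0 => simp [pvBLoop, pvE, pvO]
    | m + 1 =>
      have hd : (m + 1) / 10 < m + 1 := Nat.div_lt_self (Nat.succ_pos m) (by norm_num)
      rw [pvBLoop, dif_neg (Nat.succ_ne_zero m), pvE, pvO]
      by_cases h : (m + 1) % 10 % 2 = 0 <;>
        simp only [h, if_true, if_false] <;>
        rw [ih _ hd] <;> simp only [Prod.mk.injEq] <;> refine ⟨by ring, by ring⟩

theorem pvDigitVal_digitChar (d : Nat) (hd : d < 10) :
    pvDigitVal (Nat.digitChar d) = (d : Int) := by
  interval_cases d <;> decide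

theorem pvToDigitsCore_append (fuel : Nat) : ∀ (n : Nat) (ds : List Char),
    Nat.toDigitsCore 10 fuel n ds = Nat.toDigitsCore 10 fuel n [] ++ ds := by
  induction fuel with
  | zero => intro n ds; simp [Nat.toDigitsCore]
  | succ fuel ih =>
    intro n ds
    rw [Nat.toDigitsCore, Nat.toDigitsCore]
    by_cases h : n / 10 = 0
    · simp [h]
    · simp only [h, if_false, ite_false]
      rw [ih (n / 10) ((n % 10).digitChar :: ds), ih (n / 10) [(n % 10).digitChar]]
      simp

theorem pvMod2_eq (d : Nat) (hd : d < 10) :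
    (PySem.Int.mod (d : Int) 2 == 0) = decide (d % 2 = 0) := by
  interval_cases d <;> rfl

theorem pvAStep_digitChar (p : Int × Int) (d : Nat) (hd : d < 10) :
    pvAStep p (Nat.digitChar d) =
      (if d % 2 = 0 then (p.1 + 1, p.2) else (p.1, p.2 + 1)) := by
  unfold pvAStep
  rw [pvDigitVal_digitChar d hd, pvMod2_eq d hd]
  by_cases he : d % 2 = 0 <;> simp [he]

theorem pvCore_counts (fuel : Nat) : ∀ n : Nat, 0 < n → n < 10 ^ fuel →
    (Nat.toDigitsCore 10 fuel n []).foldl pvAStep (0, 0) = (pvE n, pvO n) := by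
  induction fuel with
  | zero => intro n hn hlt; omega
  | succ fuel ih =>
    intro n hn hlt
    rw [Nat.toDigitsCore]
    have h10 : n % 10 < 10 := Nat.mod_lt _ (by norm_num)
    by_cases h : n / 10 = 0
    · have hsmall : n < 10 := by omega
      have hmod : n % 10 = n := Nat.mod_eq_of_lt hsmall
      simp only [h, if_true, ite_true, List.foldl_cons, List.foldl_nil]
      rw [pvAStep_digitChar _ _ h10, hmod]
      match n, hn with
      | m + 1, _ =>
        rw [pvE, pvO]
        have : (m + 1) / 10 = 0 := by omega
        rw [this]
        have hp : (m + 1) % 10 = m + 1 := by omega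
        rw [hp]
        by_cases he : (m + 1) % 2 = 0 <;> simp only [he, if_true, if_false, pvE, pvO, Prod.mk.injEq] <;>
          (first | refine ⟨by ring, by ring⟩ | ring)
    · simp only [h, if_false, ite_false]
      rw [pvToDigitsCore_append fuel (n / 10) [(n % 10).digitChar]]
      rw [List.foldl_append]
      rw [ih (n / 10) (Nat.pos_of_ne_zero h) (by
        have := Nat.div_le_div_right (c := 10) (Nat.le_of_lt_succ (Nat.lt_succ_of_lt hlt))
        have h2 : n / 10 < 10 ^ (fuel + 1) / 10 + 1 := by
          have := Nat.div_le_div_right (c := 10) (Nat.le_of_lt hlt)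
          omega
        have h3 : 10 ^ (fuel + 1) / 10 = 10 ^ fuel := by
          rw [pow_succ]
          exact Nat.mul_div_cancel _ (by norm_num)
        have h4 : n / 10 ≤ 10 ^ fuel := by omega
        rcases Nat.lt_or_ge (n / 10) (10 ^ fuel) with h5 | h5
        · exact h5
        · have h6 : n / 10 = 10 ^ fuel := le_antisymm h4 h5
          have h7 : 10 ^ fuel * 10 ≤ n := by
            have := Nat.div_mul_le_self n 10
            omega
          rw [pow_succ] at hlt
          omega)]
      simp only [List.foldl_cons, List.foldl_nil]
      rw [pvAStep_digitChar _ _ h10]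
      match n, hn with
      | m + 1, _ =>
        rw [pvE, pvO]
        by_cases he : (m + 1) % 10 % 2 = 0 <;>
          simp only [he, if_true, if_false, Prod.mk.injEq] <;> (first | refine ⟨by ring, by ring⟩ | ring)

-- ===== VERDICT (by name: the statement is the Claim_ definition above) =====
theorem count_odd_and_even_digits_spec : Claim_equal_count_odd_and_even_digits := by
  intro number _
  unfold Spec_count_odd_and_even_digits count_odd_and_even_digits count_odd_and_even_digits_alt
  have habs : |number| = (number.natAbs : Int) := by
    rw [Int.abs_eq_natAbs]
  rw [habs]
  have htoStr : (PySem.Int.toStr (number.natAbs : Int)).toList = Nat.toDigits 10 number.natAbs := by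
    rw [PySem.Int.toList_toStr]
    unfold PySem.Int.toChars
    have hnn : ¬ ((number.natAbs : Int) < 0) := not_lt.mpr (Int.natCast_nonneg _)
    rw [if_neg hnn, Int.toNat_natCast]
  rw [htoStr]
  by_cases h0 : number.natAbs = 0
  · rw [h0]
    simp only [if_true, ite_true]
    decide
  · simp only [h0, if_false, ite_false]
    rw [pvBLoop_eq]
    unfold Nat.toDigits
    rw [pvCore_counts (number.natAbs + 1) number.natAbs (Nat.pos_of_ne_zero h0)
      (Nat.lt_of_lt_of_le (Nat.lt_pow_self (by norm_num)) (Nat.pow_le_pow_right (by norm_num) (Nat.le_succ _)))]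
    simp
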